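-- pv_equiv track=rewrite | github.com/200M-Warrior/Algorithm | BaekJoon/2143/gwangseok.py | get_subsums
-- ===== SOURCE A (Python) =====
-- from collections import defaultdict
--
-- def get_subsums(arr):
--     # O(N^2)
--     sum_dict = defaultdict(int)
--     for i in range(len(arr)):
--         subsum = 0
--         for j in range(i, len(arr)):
--             subsum += arr[j]
--             sum_dict[subsum] += 1
--
--     return sum_dict
-- ===== SOURCE B (Python) =====
-- from collections import defaultdict
--
-- def get_subsums(arr):
--     # Right-to-left DP: the vector of subarray sums starting at index i is obtained
--     # by shifting the vector for index i+1 (x :: [x + t ...]); blocks are stored and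
--     # counted front-to-back afterwards.
--     run = []
--     blocks = []
--     for x in reversed(arr):
--         run = [x] + [x + t for t in run]
--         blocks.append(run)
--     d = defaultdict(int)
--     for block in reversed(blocks):
--         for s in block:
--             d[s] += 1
--     return d
-- ===== Notes on version B (the rewrite author's own statement) =====
-- stated objective: alternative
-- what changed: Replaces the forward nested loops with a running accumulator by a right-to-left dynamic-programming pass that derives each index's whole vector of subarray sums by shifting the next suffix's vector ([x] + [x+t for t in prev]), stores these blocks, and counts them front-to-back in a separate pass.
import Mathlib
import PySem

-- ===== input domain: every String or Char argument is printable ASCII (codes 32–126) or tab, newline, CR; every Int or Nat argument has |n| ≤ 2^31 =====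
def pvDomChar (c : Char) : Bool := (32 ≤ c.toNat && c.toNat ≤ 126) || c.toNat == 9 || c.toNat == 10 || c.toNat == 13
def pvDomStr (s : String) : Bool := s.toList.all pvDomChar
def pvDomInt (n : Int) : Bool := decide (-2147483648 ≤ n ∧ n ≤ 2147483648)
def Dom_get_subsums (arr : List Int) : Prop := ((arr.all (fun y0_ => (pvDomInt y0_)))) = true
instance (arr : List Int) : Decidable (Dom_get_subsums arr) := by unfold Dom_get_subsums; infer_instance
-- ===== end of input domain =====

-- B replaces the forward nested accumulator loops by a right-to-left DP that shifts each
-- suffix's vector of subarray sums and counts the stored blocks afterwards; alternative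
-- decomposition, same O(n^2) cost.

-- ===== PORT A =====
def get_subsums (arr : List Int) : List (Int × Int) :=
  let n : Int := arr.length
  let d := (PySem.List.pyRange 0 n 1).foldl (fun d i =>
    ((PySem.List.pyRange i n 1).foldl
      (fun (p : Int × PySem.Dict Int Int) j =>
        let s := p.1 + PySem.List.pyGetD arr j 0
        (s, p.2.modify s 0 (· + 1)))
      ((0 : Int), d)).2) PySem.Dict.empty
  d.items

-- ===== PORT B =====
def get_subsums_alt (arr : List Int) : List (Int × Int) :=
  let rb := arr.reverse.foldl
    (fun (p : List Int × List (List Int)) x =>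
      let run := x :: p.1.map (fun t => x + t)
      (run, p.2 ++ [run]))
    ([], [])
  let d := rb.2.reverse.foldl
    (fun d block => block.foldl (fun (d : PySem.Dict Int Int) s => d.modify s 0 (· + 1)) d)
    PySem.Dict.empty
  d.items

-- ===== PRECONDITION & SPEC =====
def Spec_get_subsums (arr : List Int) (out : List (Int × Int)) : Prop := out = get_subsums_alt arr
instance (arr : List Int) (out : List (Int × Int)) : Decidable (Spec_get_subsums arr out) := by unfold Spec_get_subsums; infer_instance

-- ===== CLAIM (what is proved, stated in full; the proofs are below) =====
def Claim_equal_get_subsums : Prop := ∀ (arr : List Int), Dom_get_subsums arr → Spec_get_subsums arr (get_subsums arr)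

-- ===== LEMMAS AND PROOFS =====

-- increment one counter entry (defaultdict(int) increment)
def pvIncr (d : PySem.Dict Int Int) (k : Int) : PySem.Dict Int Int := d.modify k 0 (· + 1)

-- running subarray sums starting from accumulator c
def pvKeys (c : Int) : List Int → List Int
  | [] => []
  | x :: xs => (c + x) :: pvKeys (c + x) xs

theorem pvKeys_shift (l : List Int) (c : Int) :
    pvKeys c l = (pvKeys 0 l).map (fun t => c + t) := by
  induction l generalizing c with
  | nil => simp [pvKeys]
  | cons x xs ih =>
    simp only [pvKeys, List.map_cons, zero_add]
    refine congrArg₂ (· :: ·) rfl ?_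
    rw [ih (c + x), ih x, List.map_map]
    exact List.map_congr_left (fun t _ => by simp [Function.comp]; ring)

-- A's inner loop with pair state equals folding pvIncr over pvKeys
theorem pvInner_eq (l : List Int) (c : Int) (d : PySem.Dict Int Int) :
    (l.foldl (fun (p : Int × PySem.Dict Int Int) x =>
        (p.1 + x, p.2.modify (p.1 + x) 0 (· + 1))) (c, d)).2
      = (pvKeys c l).foldl pvIncr d := by
  induction l generalizing c d with
  | nil => simp [pvKeys]
  | cons x xs ih => simp [pvKeys, List.foldl_cons, ih, pvIncr]

-- fold of folds is a fold over the flatMap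
theorem pvFoldl_flatMap {α β : Type} (g : α → List β) (f : PySem.Dict Int Int → β → PySem.Dict Int Int)
    (l : List α) (d : PySem.Dict Int Int) :
    l.foldl (fun d a => (g a).foldl f d) d = (l.flatMap g).foldl f d := by
  induction l generalizing d with
  | nil => simp
  | cons a as ih => simp [List.foldl_cons, List.flatMap_cons, List.foldl_append, ih]

-- B's backward pass: the blocks are the pvKeys of the suffixes, last suffix first
theorem pvBlocks_eq (arr : List Int) :
    arr.reverse.foldl
      (fun (p : List Int × List (List Int)) x =>
        let run := x :: p.1.map (fun t => x + t)
        (run, p.2 ++ [run]))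
      ([], [])
    = (pvKeys 0 arr, ((List.range arr.length).map (fun i => pvKeys 0 (arr.drop i))).reverse) := by
  induction arr with
  | nil => simp [pvKeys]
  | cons x xs ih =>
    rw [List.reverse_cons, List.foldl_append, ih]
    simp only [List.foldl_cons, List.foldl_nil]
    refine congrArg₂ Prod.mk ?_ ?_
    · rw [pvKeys]
      refine congrArg₂ (· :: ·) (by ring) ?_
      rw [pvKeys_shift xs (0 + x)]
      exact List.map_congr_left (fun t _ => by ring)
    · have hrun : x :: (pvKeys 0 xs).map (fun t => x + t) = pvKeys 0 (x :: xs) := by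
        rw [pvKeys]
        refine congrArg₂ (· :: ·) (by ring) ?_
        rw [pvKeys_shift xs (0 + x)]
        exact List.map_congr_left (fun t _ => by ring)
      rw [hrun, List.length_cons, List.range_succ_eq_map, List.map_cons, List.reverse_cons,
        List.map_map, List.drop_zero]
      refine congrArg₂ (· ++ ·) (congrArg List.reverse ?_) rfl
      exact List.map_congr_left (fun i _ => by simp [Function.comp])

-- ===== VERDICT (by name: the statement is the Claim_ definition above) =====
theorem get_subsums_spec : Claim_equal_get_subsums := by
  intro arr _
  unfold Spec_get_subsums get_subsums get_subsums_alt
  dsimp only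
  rw [pvBlocks_eq]
  congr 1
  -- A side: reduce each outer step to a fold of pvIncr over the suffix's pvKeys
  rw [PySem.List.foldl_congr_mem _ _
      (fun d i => (pvKeys 0 (arr.drop i.toNat)).foldl pvIncr d) _ ?_]
  · rw [List.reverse_reverse, List.foldl_map,
      show (fun (d : PySem.Dict Int Int) (s : Int) => d.modify s 0 (· + 1)) = pvIncr from rfl,
      pvFoldl_flatMap, pvFoldl_flatMap]
    congr 1
    rw [PySem.List.pyRange_zero_natCast, List.flatMap_map]
    exact List.flatMap_congr (fun i _ => by simp)
  · intro d i hi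
    have h0 : (0 : Int) ≤ i := (PySem.List.mem_pyRange_one.mp hi).1
    rw [PySem.List.foldl_pyRange_pyGetD' arr 0
        (fun (p : Int × PySem.Dict Int Int) x => (p.1 + x, p.2.modify (p.1 + x) 0 (· + 1)))
        ((0 : Int), d) h0]
    rw [pvInner_eq]
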